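-- pv_equiv track=rewrite | github.com/Mohankumar2001/spider_algos_task1 | code.py | prevno
-- ===== SOURCE A (Python) =====
-- def prevno(num1,n):
--
--     num = list(num1);
--
--     # if the number is '1'
--     if (num1 == "1"):
--         return "0";
--     i = n - 1;
--
--     # examine bits from right to left
--     while (i >= 0):
--
--         # if '1' is encountered, convert it to '0' and then break
--         if (num[i] == '1'):
--             num[i] = '0';
--             break;
--
--         # else convert '0' to '1'
--         else:
--             num[i] = '1';
--         i -= 1;
--
--     # if only the 1st bit in the binary representation was '1'
--     if (i == 0):
--         return num[1:n];
--
--     # final binary representation of the required number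
--     return '' . join(num);
-- ===== SOURCE B (Python) =====
-- def prevno(num1, n):
--     # Previous binary number: borrow from the rightmost '1' within the first n
--     # characters instead of flipping bits one by one in a loop.
--     if num1 == "1":
--         return "0"
--     j = num1.rfind('1', 0, n)
--     if j == -1:
--         return '1' * n + num1[n:]
--     if j == 0:
--         return '1' * (n - 1)
--     return num1[:j] + '0' + '1' * (n - 1 - j) + num1[n:]
-- ===== Notes on version B (the rewrite author's own statement) =====
-- stated objective: simpler
-- what changed: A mutates a char list right-to-left, flipping '0's to '1' until it finds and clears a '1'; B locates the rightmost '1' in the first n characters with str.rfind and assembles the result from three slices, with no loop or mutation (measured constant-factor speedup: C-level rfind/slicing vs a Python-level loop).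
-- outside the precondition, e.g. on prevno('1000', 4): A returns ['1', '1', '1'], B returns '111'; on prevno('1010', -2): A returns '1010', B returns ''
import Mathlib
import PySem

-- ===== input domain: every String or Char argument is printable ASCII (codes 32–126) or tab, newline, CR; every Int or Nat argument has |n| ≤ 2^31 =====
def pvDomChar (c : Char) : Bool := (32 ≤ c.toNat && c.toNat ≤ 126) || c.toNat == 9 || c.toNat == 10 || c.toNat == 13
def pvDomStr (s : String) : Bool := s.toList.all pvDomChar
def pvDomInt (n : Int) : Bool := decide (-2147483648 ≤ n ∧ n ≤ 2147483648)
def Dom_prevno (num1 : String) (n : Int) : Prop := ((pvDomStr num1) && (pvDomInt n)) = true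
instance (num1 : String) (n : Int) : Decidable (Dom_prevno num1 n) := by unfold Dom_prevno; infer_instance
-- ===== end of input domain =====

-- B replaces A's right-to-left bit-flipping loop by locating the rightmost '1'
-- with rfind and assembling the answer from slices (objective: simpler).


-- ===== PORT A =====
-- the while loop: examine bits from right to left; returns (num, i) at loop exit
def prevnoLoop (num : List Char) (i : Int) : List Char × Int :=
  if _h : 0 ≤ i then
    match PySem.List.pyGet? num i with
    | none => (num, i)            -- Python raises IndexError here (outside Pre_)
    | some c =>
      if c = '1' then (PySem.List.pySetD num i '0', i)       -- num[i] = '0'; break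
      else prevnoLoop (PySem.List.pySetD num i '1') (i - 1)  -- num[i] = '1'; i -= 1
  else (num, i)
termination_by (i + 1).toNat
decreasing_by omega

def prevno (num1 : String) (n : Int) : String :=
  let num := num1.toList
  if num1 = "1" then "0"
  else
    let r := prevnoLoop num (n - 1)
    if r.2 = 0 then
      -- Python returns the LIST num[1:n] here, not a str (outside Pre_)
      String.mk (PySem.List.slice r.1 (some 1) (some n))
    else String.mk r.1   -- ''.join(num)

-- ===== PORT B =====
-- hand port of str.rfind: rfind1 cs = highest index of '1' in cs, else -1;
-- applied to num1[0:n] this is exactly num1.rfind('1', 0, n) (start 0,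
-- single-character needle, bounds read as slice bounds)
def rfind1 : List Char → Int
  | [] => -1
  | c :: cs =>
    let r := rfind1 cs
    if r = -1 then (if c = '1' then 0 else -1) else r + 1

def prevno_alt (num1 : String) (n : Int) : String :=
  if num1 = "1" then "0"
  else
    let l := num1.toList
    let j := rfind1 (PySem.List.slice l none (some n))   -- j = num1.rfind('1', 0, n)
    if j = -1 then
      String.mk (List.replicate n.toNat '1' ++ PySem.List.slice l (some n) none)
    else if j = 0 then
      String.mk (List.replicate (n - 1).toNat '1')
    else
      String.mk (PySem.List.slice l none (some j) ++
        '0' :: List.replicate (n - 1 - j).toNat '1' ++ PySem.List.slice l (some n) none)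

-- ===== PRECONDITION & SPEC =====
-- Pre_ excludes: n > len(num1), where A raises IndexError; -len(num1) < n < 0,
-- degenerate input outside the task's natural domain (A returns num1 unchanged,
-- B slices differently); and inputs whose rightmost '1' among the first n
-- characters sits at index 0, where A returns a Python LIST (num[1:n]), not a
-- value of the declared str type.
def Pre_prevno (num1 : String) (n : Int) : Prop :=
  num1 = "1" ∨ n ≤ -(num1.toList.length : Int) ∨
    (0 ≤ n ∧ n ≤ (num1.toList.length : Int) ∧
      ¬ ((num1.toList.take n.toNat).head? = some '1' ∧
         '1' ∉ (num1.toList.take n.toNat).drop 1))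
instance (num1 : String) (n : Int) : Decidable (Pre_prevno num1 n) := by
  unfold Pre_prevno; infer_instance

def pvWitness_prevno : String × Int := ("1010", 4)

def Spec_prevno (num1 : String) (n : Int) (out : String) : Prop := out = prevno_alt num1 n
instance (num1 : String) (n : Int) (out : String) : Decidable (Spec_prevno num1 n out) := by
  unfold Spec_prevno; infer_instance

-- ===== CLAIM (what is proved, stated in full; the proofs are below) =====
def Claim_equal_prevno : Prop := ∀ (num1 : String) (n : Int), Dom_prevno num1 n → Pre_prevno num1 n → Spec_prevno num1 n (prevno num1 n)

-- ===== LEMMAS AND PROOFS =====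

theorem set_drop_eq (l : List Char) (m : Nat) (a : Char) (h : m < l.length) :
    (l.set m a).drop m = a :: l.drop (m+1) := by
  have hlen : (l.take m).length = m := List.length_take_of_le h.le
  have h2 := List.drop_left (l₁ := l.take m) (l₂ := a :: l.drop (m+1))
  rw [hlen] at h2
  rw [List.set_eq_take_append_cons_drop, if_pos h, h2]

theorem mem_take_succ (l : List Char) (m : Nat) (c : Char) (hc : c ∈ l.take m) :
    c ∈ l.take (m+1) := by
  have : c ∈ (l.take (m+1)).take m := by
    rw [List.take_take, min_eq_left (Nat.le_succ m)]; exact hc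
  exact List.mem_of_mem_take this

-- rfind1 characterisation
theorem rfind1_cases (cs : List Char) : rfind1 cs = -1 ∨ ∃ j : Nat, rfind1 cs = (j : Int) := by
  induction cs with
  | nil => left; rfl
  | cons c cs ih =>
    simp only [rfind1]
    split_ifs with h1 h2
    · right; exact ⟨0, rfl⟩
    · left; rfl
    · rcases ih with h | ⟨j, hj⟩
      · exact absurd h h1
      · right; exact ⟨j + 1, by rw [hj]; push_cast; ring⟩

theorem rfind1_eq_neg_one_iff (cs : List Char) : rfind1 cs = -1 ↔ '1' ∉ cs := by
  induction cs with
  | nil => simp [rfind1]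
  | cons c cs ih =>
    simp only [rfind1, List.mem_cons]
    split_ifs with h1 h2
    · simp [h2]
    · constructor
      · intro _
        rintro (h | h)
        · exact h2 h.symm
        · exact (ih.mp h1) h
      · intro _; rfl
    · have hmem : '1' ∈ cs := by
        by_contra hmem
        exact h1 (ih.mpr hmem)
      rcases rfind1_cases cs with hc | ⟨j, hj⟩
      · exact absurd hc h1
      · rw [hj]
        constructor
        · intro h
          exfalso
          have : (0:Int) ≤ (j : Int) := by positivity
          omega
        · intro h
          exact absurd (Or.inr hmem) h

theorem rfind1_spec (cs : List Char) (j : Nat) (h : rfind1 cs = (j : Int)) :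
    j < cs.length ∧ cs[j]? = some '1' ∧ '1' ∉ cs.drop (j + 1) := by
  induction cs generalizing j with
  | nil => simp [rfind1] at h
  | cons c cs ih =>
    simp only [rfind1] at h
    split_ifs at h with h1 h2
    · have hj : j = 0 := by omega
      subst hj
      refine ⟨by simp, by simp [h2], ?_⟩
      simpa using (rfind1_eq_neg_one_iff cs).mp h1
    · rcases rfind1_cases cs with hc | ⟨j', hj'⟩
      · exact absurd hc h1
      · have hjj : j = j' + 1 := by rw [hj'] at h; omega
        obtain ⟨hlt, hget, hno⟩ := ih j' hj'
        subst hjj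
        refine ⟨by simpa using Nat.succ_lt_succ hlt, by simpa using hget, ?_⟩
        simpa using hno

-- loop characterisation: no '1' among the first m characters
theorem loop_no_one (m : Nat) (l : List Char) (hm : m ≤ l.length)
    (h : '1' ∉ l.take m) :
    prevnoLoop l ((m : Int) - 1) = (List.replicate m '1' ++ l.drop m, -1) := by
  induction m generalizing l with
  | zero => rw [prevnoLoop]; norm_num
  | succ m ih =>
    have hmlt : m < l.length := hm
    have hcast : ((m + 1 : Nat) : Int) - 1 = ((m : Nat) : Int) := by push_cast; ring
    rw [hcast, prevnoLoop]
    have hget : PySem.List.pyGet? l ((m : Nat) : Int) = some l[m] := by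
      simp [List.getElem?_eq_getElem hmlt]
    have hmem : l[m] ∈ l.take (m + 1) := by
      rw [List.mem_take_iff_getElem]
      exact ⟨m, by omega, rfl⟩
    have hne : ¬ (l[m] = '1') := fun hc => h (hc ▸ hmem)
    rw [dif_pos (by positivity : (0:Int) ≤ ((m : Nat) : Int))]
    simp only [hget, if_neg hne]
    have hset : PySem.List.pySetD l ((m : Nat) : Int) '1' = l.set m '1' := by
      simp
    rw [hset]
    have htake : (l.set m '1').take m = l.take m := List.take_set_of_le (le_refl m)
    have := ih (l.set m '1')
      (by rw [List.length_set]; exact hmlt.le)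
      (by rw [htake]; exact fun hmem' => h (mem_take_succ l m '1' hmem'))
    rw [this, set_drop_eq l m '1' hmlt, List.replicate_succ' (n := m)]
    simp [List.append_assoc]

-- loop characterisation: rightmost '1' among the first m characters at index j
theorem loop_found (m : Nat) (l : List Char) (j : Nat) (hj : j < m) (hm : m ≤ l.length)
    (hone : l[j]? = some '1') (hno : '1' ∉ (l.take m).drop (j + 1)) :
    prevnoLoop l ((m : Int) - 1) =
      (l.take j ++ '0' :: List.replicate (m - 1 - j) '1' ++ l.drop m, (j : Int)) := by
  induction m generalizing l with
  | zero => omega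
  | succ m ihm =>
    have hmlt : m < l.length := hm
    have hcast : ((m + 1 : Nat) : Int) - 1 = ((m : Nat) : Int) := by push_cast; ring
    rw [hcast, prevnoLoop]
    rw [dif_pos (by positivity : (0:Int) ≤ ((m : Nat) : Int))]
    have hget : PySem.List.pyGet? l ((m : Nat) : Int) = some l[m] := by
      simp [List.getElem?_eq_getElem hmlt]
    by_cases hjm : j = m
    · subst hjm
      have : l[j] = '1' := by
        have := List.getElem?_eq_getElem hmlt
        rw [this] at hone; exact Option.some.inj hone
      simp only [hget, this, if_pos]
      have hset : PySem.List.pySetD l ((j : Nat) : Int) '0' = l.set j '0' := by simp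
      rw [hset, List.set_eq_take_append_cons_drop, if_pos hmlt]
      simp
    · have hjlt : j < m := by omega
      have hmem : l[m] ∈ (l.take (m + 1)).drop (j + 1) := by
        have hlen : (l.take (m+1)).length = m + 1 := List.length_take_of_le (by omega)
        have hlen2 : ((l.take (m+1)).drop (j+1)).length = m - j := by
          rw [List.length_drop, hlen]
          omega
        have hvalid : m - j - 1 < ((l.take (m+1)).drop (j+1)).length := by omega
        have hidx : j + 1 + (m - j - 1) = m := by omega
        have h1 : ((l.take (m+1)).drop (j+1))[m - j - 1]'hvalid
            = (l.take (m+1))[j + 1 + (m - j - 1)]'(by omega) := by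
          rw [List.getElem_drop]
        have h2 : (l.take (m+1))[j + 1 + (m - j - 1)]'(by omega) = l[m] := by
          simp only [List.getElem_take, hidx]
        have h3 := List.getElem_mem hvalid
        rwa [h1, h2] at h3
      have hne : ¬ (l[m] = '1') := fun hc => hno (hc ▸ hmem)
      simp only [hget, if_neg hne]
      have hset : PySem.List.pySetD l ((m : Nat) : Int) '1' = l.set m '1' := by simp
      rw [hset]
      have htakem : (l.set m '1').take m = l.take m := List.take_set_of_le (le_refl m)
      have hone' : (l.set m '1')[j]? = some '1' := by
        rw [List.getElem?_set_ne (by omega)]; exact hone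
      have hno' : '1' ∉ ((l.set m '1').take m).drop (j + 1) := by
        rw [htakem]
        intro hmem'
        have hpre : l.take m <+: l.take (m + 1) := by
          refine ⟨[l[m]], ?_⟩
          rw [List.take_succ, List.getElem?_eq_getElem hmlt]
          rfl
        have : (l.take m).drop (j+1) <+: (l.take (m+1)).drop (j+1) := hpre.drop _
        exact hno (this.sublist.subset hmem')
      have := ihm (l.set m '1') hjlt (by rw [List.length_set]; exact hmlt.le) hone' hno'
      rw [this, List.take_set_of_le hjlt.le, set_drop_eq l m '1' hmlt]
      have hrep : m - 1 - j + 1 = (m + 1) - 1 - j := by omega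
      rw [← hrep, List.replicate_succ' (n := m - 1 - j)]
      simp [List.append_assoc]

-- ===== VERDICT (by name: the statement is the Claim_ definition above) =====
theorem prevno_spec : Claim_equal_prevno := by
  intro num1 n _hdom hpre
  unfold Spec_prevno
  by_cases h1 : num1 = "1"
  · simp [prevno, prevno_alt, h1]
  · rcases hpre with h | hneg | ⟨hn0, hnle, hnb⟩
    · exact absurd h h1
    · -- n ≤ -len(num1): the loop never runs and B's slices reproduce num1
      have hA : prevnoLoop num1.toList (n - 1) = (num1.toList, n - 1) := by
        rw [prevnoLoop, dif_neg (by omega : ¬ (0:Int) ≤ n - 1)]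
      by_cases hn0' : n = 0
      · have hlen0 : num1.toList.length = 0 := by omega
        have hnil : num1.toList = [] := List.eq_nil_of_length_eq_zero hlen0
        subst hn0'
        have hB1 : PySem.List.slice num1.toList none (some 0) = [] := by
          rw [PySem.List.slice_to _ (by norm_num : (0:Int) ≤ 0)]
          simp
        have hB2 : PySem.List.slice num1.toList (some 0) none = num1.toList := by
          rw [PySem.List.slice_from _ (by norm_num : (0:Int) ≤ 0)]
          simp
        simp only [prevno, prevno_alt, if_neg h1, hA, hB1, hB2, rfind1,
          if_neg (by omega : ¬ (0:Int) - 1 = 0)]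
        simp
      · have hk : 0 < (-n).toNat := by omega
        have hnk : n = -(((-n).toNat : Nat) : Int) := by omega
        have hle : num1.toList.length ≤ (-n).toNat := by omega
        have hsub : num1.toList.length - (-n).toNat = 0 := Nat.sub_eq_zero_of_le hle
        have hB1 : PySem.List.slice num1.toList none (some n) = [] := by
          rw [hnk, PySem.List.slice_to_neg_natCast _ _ hk, hsub, List.take_zero]
        have hB2 : PySem.List.slice num1.toList (some n) none = num1.toList := by
          rw [hnk, PySem.List.slice_from_neg_natCast _ _ hk, hsub, List.drop_zero]
        have hnt : n.toNat = 0 := by omega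
        simp only [prevno, prevno_alt, if_neg h1, hA, hB1, hB2, hnt, rfind1,
          if_neg (by omega : ¬ n - 1 = 0)]
        simp
    set l := num1.toList with hl
    set m := n.toNat with hmdef
    have hmn : (m : Int) = n := Int.toNat_of_nonneg hn0
    have hm : m ≤ l.length := by omega
    have hslice : PySem.List.slice l none (some n) = l.take m := by
      rw [PySem.List.slice_to l hn0]
    have hslice2 : PySem.List.slice l (some n) none = l.drop m := by
      rw [PySem.List.slice_from l hn0]
    have hn1 : n - 1 = (m : Int) - 1 := by omega
    rcases rfind1_cases (l.take m) with hr | ⟨j, hr⟩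
    · -- no '1' in the first n characters
      have hno : '1' ∉ l.take m := (rfind1_eq_neg_one_iff _).mp hr
      have hloop := loop_no_one m l hm hno
      simp only [prevno, prevno_alt, if_neg h1, ← hl, hn1, hloop, hslice, hslice2, hr]
      norm_num
      rfl
    · obtain ⟨hjlt', hget, hnodrop⟩ := rfind1_spec (l.take m) j hr
      have hlen : (l.take m).length = m := List.length_take_of_le hm
      have hjm : j < m := by omega
      have hone : l[j]? = some '1' := by
        rwa [List.getElem?_take_of_lt hjm] at hget
      have hj0 : j ≠ 0 := by
        intro hj0
        subst hj0
        exact hnb ⟨by rw [List.head?_eq_getElem?]; exact hget, by simpa using hnodrop⟩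
      have hloop := loop_found m l j hjm hm hone (by simpa using hnodrop)
      have hjne : ((j : Nat) : Int) ≠ 0 := by
        simpa using (Int.natCast_ne_zero).mpr hj0
      have hjne1 : ((j : Nat) : Int) ≠ -1 := by
        have := Int.natCast_nonneg j
        omega
      have hsj : PySem.List.slice l none (some ((j : Nat) : Int)) = l.take j := by
        rw [PySem.List.slice_to l (by positivity : (0:Int) ≤ ((j : Nat) : Int))]; simp
      have hrepn' : ((m : Int) - 1 - ((j : Nat) : Int)).toNat = m - 1 - j := by omega
      simp only [prevno, prevno_alt, if_neg h1, ← hl, hn1, hloop, hslice, hslice2, hr,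
        if_neg hjne1, if_neg hjne, hsj, hrepn']
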